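-- pv_equiv track=rewrite | github.com/lissity/AoC | 2015/Day8/main.py | getInMemoryLength
-- ===== SOURCE A (Python) =====
-- def getInMemoryLength(string):
--     length = 0
--     i = 1
--      # Looping through the string skipping first and last double quote
--     while i < len(string)-1:
--         next = string[i:i+2]
--         if (next == r'\x'):                     # Hexadecimal escape sequence
--             i += 4
--         elif (next == r'\\' or next == r'\"'):  # Escape sequence for \ and "
--             i += 2
--         else:                                   # Normal string character
--             i += 1
--         length +=1
--     return length
-- ===== SOURCE B (Python) =====
-- def getInMemoryLength(string):
--     # Bulk-skip scanner: strip the quotes, then loop only once per escape,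
--     # using str.find to jump over whole runs of literal characters at C speed.
--     inner = string[1:-1]
--     n = len(inner)
--     total = 0
--     pos = 0
--     while pos < n:
--         b = inner.find('\\', pos)
--         if b == -1:
--             total += n - pos
--             break
--         total += (b - pos) + 1
--         nxt = inner[b + 1:b + 2]
--         if nxt == 'x':
--             pos = b + 4
--         elif nxt == '\\' or nxt == '"':
--             pos = b + 2
--         else:
--             pos = b + 1
--     return total
-- ===== Notes on version B (the rewrite author's own statement) =====
-- stated objective: faster
-- what changed: B strips the quotes once and then loops only once per escape sequence: str.find jumps directly to the next backslash and the run of literal characters in between is counted with one subtraction, instead of A's per-character while loop that advances a manual index and builds a fresh two-character slice at every single position.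
import Mathlib
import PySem

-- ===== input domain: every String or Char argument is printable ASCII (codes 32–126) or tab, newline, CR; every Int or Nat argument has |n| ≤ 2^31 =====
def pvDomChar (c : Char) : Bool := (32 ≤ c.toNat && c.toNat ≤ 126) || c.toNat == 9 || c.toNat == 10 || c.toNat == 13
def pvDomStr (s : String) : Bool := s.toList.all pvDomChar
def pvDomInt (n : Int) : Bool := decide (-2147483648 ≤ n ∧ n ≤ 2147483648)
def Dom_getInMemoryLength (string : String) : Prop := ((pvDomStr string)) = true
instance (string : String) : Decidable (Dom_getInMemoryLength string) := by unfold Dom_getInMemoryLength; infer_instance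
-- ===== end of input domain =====

-- B strips the quotes once and then loops only once per escape: str.find jumps to the next
-- backslash and each run of literal characters is counted with one subtraction, instead of
-- A's per-character while loop that slices two characters at every index (objective: alternative).

-- ===== PORT A =====
-- A's while loop: i is the index, `next` is string[i:i+2] = (cs.drop i).take 2,
-- loop guard i < len(string)-1 (Nat subtraction agrees with Python's int here since i ≥ 1 > -1).
def pvALoop (cs : List Char) (i length : Nat) : Nat :=
  if _h : i < cs.length - 1 then
    let next := (cs.drop i).take 2
    if next = ['\\', 'x'] then pvALoop cs (i + 4) (length + 1)
    else if next = ['\\', '\\'] ∨ next = ['\\', '"'] then pvALoop cs (i + 2) (length + 1)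
    else pvALoop cs (i + 1) (length + 1)
  else length
termination_by cs.length - i
decreasing_by all_goals omega

def getInMemoryLength (string : String) : Int :=
  (pvALoop string.toList 1 0 : Int)

-- ===== PORT B =====
-- cited by pvBLoop's decreasing_by: a successful find lands at or after the start index
lemma pvFind_ge (inner : List Char) (pos : Nat) (h : pos ≤ inner.length)
    (hb : PySem.Chars.findFrom inner ['\\'] (pos : Int) none ≠ -1) :
    (pos : Int) ≤ PySem.Chars.findFrom inner ['\\'] (pos : Int) none :=
  (PySem.Chars.findFrom_natCast_spec inner ['\\'] pos h hb).1

-- Source B's while loop: b = inner.find('\\', pos) (PySem.Chars.findFrom, -1 = absent),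
-- nxt = inner[b+1:b+2] is a slice (empty past the end); state (pos, total).
def pvBLoop (inner : List Char) (pos total : Nat) : Nat :=
  if h : pos < inner.length then
    let b := PySem.Chars.findFrom inner ['\\'] (pos : Int) none
    if hb : b = -1 then total + (inner.length - pos)
    else
      let total' := total + (b.toNat - pos) + 1
      let nxt := PySem.List.slice inner (some (b + 1)) (some (b + 2))
      if nxt = ['x'] then pvBLoop inner (b.toNat + 4) total'
      else if nxt = ['\\'] ∨ nxt = ['"'] then pvBLoop inner (b.toNat + 2) total'
      else pvBLoop inner (b.toNat + 1) total'
  else total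
termination_by inner.length - pos
decreasing_by all_goals (have := pvFind_ge inner pos (le_of_lt h) hb; omega)

def getInMemoryLength_alt (string : String) : Int :=
  -- inner = string[1:-1], inlined into the loop call
  (pvBLoop (PySem.List.slice string.toList (some 1) (some (-1))) 0 0 : Int)

-- ===== PRECONDITION & SPEC =====
def Spec_getInMemoryLength (string : String) (out : Int) : Prop := out = getInMemoryLength_alt string
instance (string : String) (out : Int) : Decidable (Spec_getInMemoryLength string out) := by unfold Spec_getInMemoryLength; infer_instance

-- ===== CLAIM (what is proved, stated in full; the proofs are below) =====
def Claim_equal_getInMemoryLength : Prop := ∀ (string : String), Dom_getInMemoryLength string → Spec_getInMemoryLength string (getInMemoryLength string)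

-- ===== LEMMAS AND PROOFS =====

-- proof-layer bridge: the token count of a character list, consuming one decoded char per step
def pvCount (chars : List Char) : Nat :=
  match chars with
  | [] => 0
  | c :: rest =>
    if c = '\\' ∧ rest.head? = some 'x' then 1 + pvCount (rest.drop 3)
    else if c = '\\' ∧ (rest.head? = some '\\' ∨ rest.head? = some '"') then 1 + pvCount (rest.drop 1)
    else 1 + pvCount rest
termination_by chars.length
decreasing_by all_goals (simp only [List.length_drop, List.length_cons]; omega)

-- string[1:-1] as both ports slice it is "drop the first element, then drop the last".
lemma slice_one_neg_one (cs : List Char) :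
    PySem.List.slice cs (some 1) (some (-1)) = (cs.drop 1).dropLast := by
  cases cs with
  | nil => simp [PySem.List.slice]
  | cons a t =>
    simp [PySem.List.slice, PySem.List.clampIdx, List.dropLast_eq_take]
    rw [if_neg (by omega)]
    omega

-- dropLast commutes with drop.
lemma dropLast_drop_comm (l : List Char) (n : Nat) :
    l.dropLast.drop n = (l.drop n).dropLast := by
  simp [List.dropLast_eq_take, List.drop_take]
  omega

lemma dropLast_of_len_le_one (l : List Char) (h : l.length ≤ 1) : l.dropLast = [] := by
  simp [List.dropLast_eq_take]
  omega

-- one pvCount step on the inner shape matching A's hex branch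
lemma bcount_hex (t : List Char) :
    pvCount (('\\' :: 'x' :: t).dropLast) = 1 + pvCount ((t.drop 2).dropLast) := by
  cases t with
  | nil => simp [pvCount]
  | cons u v =>
    rw [show ('\\' :: 'x' :: u :: v).dropLast = '\\' :: 'x' :: (u :: v).dropLast by simp]
    rw [show pvCount ('\\' :: 'x' :: (u :: v).dropLast) = 1 + pvCount ((('x' : Char) :: (u :: v).dropLast).drop 3) by
      rw [pvCount.eq_def]; simp]
    rw [show (('x' : Char) :: (u :: v).dropLast).drop 3 = ((u :: v).dropLast).drop 2 from rfl]
    rw [dropLast_drop_comm]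

-- one pvCount step matching A's two-character escape branch
lemma bcount_two (b : Char) (t : List Char) (hb : b = '\\' ∨ b = '"') :
    pvCount (('\\' :: b :: t).dropLast) = 1 + pvCount t.dropLast := by
  cases t with
  | nil => rcases hb with rfl | rfl <;> simp [pvCount]
  | cons u v =>
    rw [show ('\\' :: b :: u :: v).dropLast = '\\' :: b :: (u :: v).dropLast by simp]
    rw [show pvCount ('\\' :: b :: (u :: v).dropLast) = 1 + pvCount ((b :: (u :: v).dropLast).drop 1) by
      rw [pvCount.eq_def]
      rcases hb with rfl | rfl <;> simp]
    rfl

-- one pvCount step matching A's normal-character branch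
lemma bcount_norm (a b : Char) (t : List Char)
    (h1 : ¬ ([a, b] = ['\\', 'x'])) (h2 : ¬ ([a, b] = ['\\', '\\'] ∨ [a, b] = ['\\', '"'])) :
    pvCount ((a :: b :: t).dropLast) = 1 + pvCount ((b :: t).dropLast) := by
  rw [show (a :: b :: t).dropLast = a :: (b :: t).dropLast by simp]
  by_cases ha : a = '\\'
  · subst ha
    have hbx : b ≠ 'x' := fun h => h1 (by rw [h])
    have hbb : b ≠ '\\' := fun h => h2 (Or.inl (by rw [h]))
    have hbq : b ≠ '"' := fun h => h2 (Or.inr (by rw [h]))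
    cases t with
    | nil =>
      rw [show ((b :: ([] : List Char)).dropLast) = [] from rfl]
      simp [pvCount]
    | cons u v =>
      rw [show (b :: u :: v).dropLast = b :: (u :: v).dropLast by simp]
      rw [pvCount.eq_def]
      simp [hbx, hbb, hbq]
  · rw [pvCount.eq_def]
    simp [ha]

-- A-side invariant: the loop from index i counts exactly pvCount of the inner suffix from i
lemma loop_eq_bcount (cs : List Char) (i length : Nat) :
    pvALoop cs i length = length + pvCount ((cs.drop i).dropLast) := by
  induction i, length using pvALoop.induct cs with
  | case1 i length h next h1 ih =>
    replace h1 : (cs.drop i).take 2 = ['\\', 'x'] := h1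
    rw [pvALoop]; rw [dif_pos h, if_pos h1, ih]
    obtain ⟨a, b, t, hd⟩ : ∃ a b t, cs.drop i = a :: b :: t := by
      have hl : 2 ≤ (cs.drop i).length := by simp; omega
      match hm : cs.drop i with
      | [] => rw [hm] at hl; simp at hl
      | [x] => rw [hm] at hl; simp at hl
      | x :: y :: t => exact ⟨x, y, t, rfl⟩
    rw [hd] at h1; simp at h1
    obtain ⟨rfl, rfl⟩ := h1
    have h4 : cs.drop (i + 4) = t.drop 2 := by
      rw [← List.drop_drop, hd]; rfl
    rw [hd, h4, bcount_hex]; omega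
  | case2 i length h next h1 h2 ih =>
    replace h1 : ¬ ((cs.drop i).take 2 = ['\\', 'x']) := h1
    replace h2 : (cs.drop i).take 2 = ['\\', '\\'] ∨ (cs.drop i).take 2 = ['\\', '"'] := h2
    rw [pvALoop]; rw [dif_pos h, if_neg h1, if_pos h2, ih]
    obtain ⟨a, b, t, hd⟩ : ∃ a b t, cs.drop i = a :: b :: t := by
      have hl : 2 ≤ (cs.drop i).length := by simp; omega
      match hm : cs.drop i with
      | [] => rw [hm] at hl; simp at hl
      | [x] => rw [hm] at hl; simp at hl
      | x :: y :: t => exact ⟨x, y, t, rfl⟩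
    rw [hd] at h2; simp at h2
    have ha : a = '\\' := by rcases h2 with ⟨h, _⟩ | ⟨h, _⟩ <;> exact h
    have hb : b = '\\' ∨ b = '"' := by rcases h2 with ⟨_, h⟩ | ⟨_, h⟩ <;> [left; right] <;> exact h
    have h2' : cs.drop (i + 2) = t := by
      rw [← List.drop_drop, hd]; rfl
    rw [hd, h2', ha, bcount_two b t hb]; omega
  | case3 i length h next h1 h2 ih =>
    replace h1 : ¬ ((cs.drop i).take 2 = ['\\', 'x']) := h1
    replace h2 : ¬ ((cs.drop i).take 2 = ['\\', '\\'] ∨ (cs.drop i).take 2 = ['\\', '"']) := h2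
    rw [pvALoop]; rw [dif_pos h, if_neg h1, if_neg h2, ih]
    obtain ⟨a, b, t, hd⟩ : ∃ a b t, cs.drop i = a :: b :: t := by
      have hl : 2 ≤ (cs.drop i).length := by simp; omega
      match hm : cs.drop i with
      | [] => rw [hm] at hl; simp at hl
      | [x] => rw [hm] at hl; simp at hl
      | x :: y :: t => exact ⟨x, y, t, rfl⟩
    rw [hd] at h1 h2; simp at h1 h2
    have h1' : cs.drop (i + 1) = b :: t := by
      rw [← List.drop_drop, hd]; rfl
    rw [hd, h1', bcount_norm a b t (by simpa using h1) (by simpa using h2)]; omega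
  | case4 i length h =>
    have hnil : ((cs.drop i).dropLast) = [] := by
      apply dropLast_of_len_le_one; simp; omega
    rw [pvALoop]; rw [dif_neg h, hnil]; simp [pvCount]

-- a one-character list is a prefix exactly of lists with that head
lemma singleton_prefix_iff (c : Char) (l : List Char) : [c] <+: l ↔ l.head? = some c := by
  cases l with
  | nil => simp
  | cons a t => simp [List.cons_prefix_cons, eq_comm]

-- a one-character list is an infix exactly of lists containing it
lemma singleton_infix_iff (c : Char) (l : List Char) : [c] <:+: l ↔ c ∈ l := by
  constructor
  · intro h; exact h.subset (List.mem_singleton_self c)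
  · intro h
    obtain ⟨s, t, rfl⟩ := List.append_of_mem h
    exact ⟨s, t, by simp⟩

-- a run without backslashes contributes its length to pvCount, one char per token
lemma count_append_no_bs (pre l : List Char) (h : '\\' ∉ pre) :
    pvCount (pre ++ l) = pre.length + pvCount l := by
  induction pre with
  | nil => simp
  | cons a t ih =>
    have ha : a ≠ '\\' := fun he => h (he ▸ List.mem_cons_self)
    have ht : '\\' ∉ t := fun hm => h (List.mem_cons_of_mem a hm)
    rw [List.cons_append, pvCount.eq_def]
    simp only [ha, false_and, if_false]
    rw [ih ht]
    simp; omega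


-- a one-character take pins the head
lemma take_one_eq_iff (c : Char) (l : List Char) : l.take 1 = [c] ↔ l.head? = some c := by
  cases l <;> simp

-- pvCount steps at a backslash, by the (possibly absent) following character
lemma count_step_hex (l : List Char) (hhd : l.head? = some 'x') :
    pvCount ('\\' :: l) = 1 + pvCount (l.drop 3) := by
  rw [pvCount.eq_def]; simp [hhd]

lemma count_step_two (l : List Char) (hhd : l.head? = some '\\' ∨ l.head? = some '"') :
    pvCount ('\\' :: l) = 1 + pvCount (l.drop 1) := by
  rw [pvCount.eq_def]
  rcases hhd with h | h <;> simp [h]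

lemma count_step_other (l : List Char) (hx : l.head? ≠ some 'x')
    (hq : ¬ (l.head? = some '\\' ∨ l.head? = some '"')) :
    pvCount ('\\' :: l) = 1 + pvCount l := by
  rw [pvCount.eq_def]; simp [hx, hq]

-- everything a successful find gives us: location, the backslash there, the clean run before it
lemma find_facts (inner : List Char) (pos : Nat) (h : pos ≤ inner.length)
    (hb : PySem.Chars.findFrom inner ['\\'] (pos : Int) none ≠ -1) :
    pos ≤ (PySem.Chars.findFrom inner ['\\'] (pos : Int) none).toNat ∧
    (PySem.Chars.findFrom inner ['\\'] (pos : Int) none).toNat < inner.length ∧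
    (inner.drop (PySem.Chars.findFrom inner ['\\'] (pos : Int) none).toNat).head? = some '\\' ∧
    PySem.Chars.findFrom inner ['\\'] (pos : Int) none
      = (((PySem.Chars.findFrom inner ['\\'] (pos : Int) none).toNat : Nat) : Int) ∧
    pvCount (inner.drop pos)
      = ((PySem.Chars.findFrom inner ['\\'] (pos : Int) none).toNat - pos)
        + pvCount (inner.drop (PySem.Chars.findFrom inner ['\\'] (pos : Int) none).toNat) := by
  obtain ⟨h1, h2, h3⟩ := PySem.Chars.findFrom_natCast_spec inner ['\\'] pos h hb
  set b := PySem.Chars.findFrom inner ['\\'] (pos : Int) none with hbdef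
  have hcast : b = ((b.toNat : Nat) : Int) := by omega
  have hk : pos ≤ b.toNat := by omega
  have hhead : (inner.drop b.toNat).head? = some '\\' := by
    have := (singleton_prefix_iff '\\' (inner.drop b.toNat)).mp h2
    exact this
  have hlt : b.toNat < inner.length := by
    by_contra hge
    rw [List.drop_eq_nil_of_le (by omega)] at hhead
    simp at hhead
  have hsplit : inner.drop pos = (inner.drop pos).take (b.toNat - pos) ++ inner.drop b.toNat := by
    conv_lhs => rw [← List.take_append_drop (b.toNat - pos) (inner.drop pos)]
    rw [List.drop_drop]
    congr 2
    omega
  have hpre : '\\' ∉ (inner.drop pos).take (b.toNat - pos) := by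
    intro hm
    obtain ⟨j, hj, hje⟩ := List.getElem_of_mem hm
    have hjl : j < b.toNat - pos := by
      have := hj
      simp [List.length_take] at this
      omega
    have hjin : pos + j < inner.length := by omega
    have hval : inner[pos + j]'hjin = '\\' := by
      rw [← hje]
      simp [List.getElem_take, List.getElem_drop]
    apply h3 (pos + j) (by omega) (by omega)
    rw [singleton_prefix_iff, List.head?_drop]
    simp [hjin, hval]
  refine ⟨hk, hlt, hhead, hcast, ?_⟩
  conv_lhs => rw [hsplit]
  rw [count_append_no_bs _ _ hpre]
  simp [List.length_take]
  omega

-- B-side invariant: the find loop from pos computes pvCount of the suffix from pos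
lemma bloop_eq_count (inner : List Char) (pos total : Nat) :
    pvBLoop inner pos total = total + pvCount (inner.drop pos) := by
  induction pos, total using pvBLoop.induct inner with
  | case2 pos total h b hb total' nxt hx ih =>
    obtain ⟨hk, hlt, hhead, hcast, hcnt⟩ := find_facts inner pos (le_of_lt h) hb
    replace hx : PySem.List.slice inner
        (some (PySem.Chars.findFrom inner ['\\'] (pos : Int) none + 1))
        (some (PySem.Chars.findFrom inner ['\\'] (pos : Int) none + 2)) = ['x'] := hx
    rw [hcast] at hx
    set k := (PySem.Chars.findFrom inner ['\\'] (pos : Int) none).toNat with hkdef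
    rw [show ((k : Int) + 1) = ((k + 1 : Nat) : Int) by push_cast; ring,
        show ((k : Int) + 2) = (((k + 1 : Nat) : Int) + ((1 : Nat) : Int)) by push_cast; ring,
        PySem.List.slice_natCast_add, take_one_eq_iff] at hx
    have hget : inner[k]'hlt = '\\' := by
      have h5 : inner[k]? = some '\\' := by rw [← List.head?_drop]; exact hhead
      rw [List.getElem?_eq_getElem hlt] at h5
      exact Option.some.inj h5
    have hdk : inner.drop k = '\\' :: inner.drop (k + 1) := by
      rw [List.drop_eq_getElem_cons hlt, hget]
    rw [pvBLoop, dif_pos h, dif_neg hb]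
    rw [if_pos (show PySem.List.slice inner _ _ = ['x'] by
      rw [hcast,
          show ((k : Int) + 1) = ((k + 1 : Nat) : Int) by push_cast; ring,
          show ((k : Int) + 2) = (((k + 1 : Nat) : Int) + ((1 : Nat) : Int)) by push_cast; ring,
          PySem.List.slice_natCast_add, take_one_eq_iff]
      exact hx)]
    rw [← hkdef, ih, hcnt, hdk, count_step_hex _ hx]
    rw [show (inner.drop (k + 1)).drop 3 = inner.drop (k + 4) by
      rw [List.drop_drop]]
    omega
  | case3 pos total h b hb total' nxt hx hq ih =>
    obtain ⟨hk, hlt, hhead, hcast, hcnt⟩ := find_facts inner pos (le_of_lt h) hb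
    replace hq : PySem.List.slice inner
        (some (PySem.Chars.findFrom inner ['\\'] (pos : Int) none + 1))
        (some (PySem.Chars.findFrom inner ['\\'] (pos : Int) none + 2)) = ['\\'] ∨
      PySem.List.slice inner
        (some (PySem.Chars.findFrom inner ['\\'] (pos : Int) none + 1))
        (some (PySem.Chars.findFrom inner ['\\'] (pos : Int) none + 2)) = ['"'] := hq
    replace hx : ¬ PySem.List.slice inner
        (some (PySem.Chars.findFrom inner ['\\'] (pos : Int) none + 1))
        (some (PySem.Chars.findFrom inner ['\\'] (pos : Int) none + 2)) = ['x'] := hx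
    rw [hcast] at hx hq
    set k := (PySem.Chars.findFrom inner ['\\'] (pos : Int) none).toNat with hkdef
    rw [show ((k : Int) + 1) = ((k + 1 : Nat) : Int) by push_cast; ring,
        show ((k : Int) + 2) = (((k + 1 : Nat) : Int) + ((1 : Nat) : Int)) by push_cast; ring,
        PySem.List.slice_natCast_add, take_one_eq_iff, take_one_eq_iff] at hq
    rw [show ((k : Int) + 1) = ((k + 1 : Nat) : Int) by push_cast; ring,
        show ((k : Int) + 2) = (((k + 1 : Nat) : Int) + ((1 : Nat) : Int)) by push_cast; ring,
        PySem.List.slice_natCast_add, take_one_eq_iff] at hx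
    have hget : inner[k]'hlt = '\\' := by
      have h5 : inner[k]? = some '\\' := by rw [← List.head?_drop]; exact hhead
      rw [List.getElem?_eq_getElem hlt] at h5
      exact Option.some.inj h5
    have hdk : inner.drop k = '\\' :: inner.drop (k + 1) := by
      rw [List.drop_eq_getElem_cons hlt, hget]
    rw [pvBLoop, dif_pos h, dif_neg hb]
    rw [if_neg (show ¬ PySem.List.slice inner _ _ = ['x'] by
      rw [hcast,
          show ((k : Int) + 1) = ((k + 1 : Nat) : Int) by push_cast; ring,
          show ((k : Int) + 2) = (((k + 1 : Nat) : Int) + ((1 : Nat) : Int)) by push_cast; ring,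
          PySem.List.slice_natCast_add, take_one_eq_iff]
      exact hx)]
    rw [if_pos (show PySem.List.slice inner _ _ = ['\\'] ∨ PySem.List.slice inner _ _ = ['"'] by
      rw [hcast,
          show ((k : Int) + 1) = ((k + 1 : Nat) : Int) by push_cast; ring,
          show ((k : Int) + 2) = (((k + 1 : Nat) : Int) + ((1 : Nat) : Int)) by push_cast; ring,
          PySem.List.slice_natCast_add, take_one_eq_iff, take_one_eq_iff]
      exact hq)]
    rw [← hkdef, ih, hcnt, hdk, count_step_two _ hq]
    rw [show (inner.drop (k + 1)).drop 1 = inner.drop (k + 2) by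
      rw [List.drop_drop]]
    omega
  | case4 pos total h b hb total' nxt hx hq ih =>
    obtain ⟨hk, hlt, hhead, hcast, hcnt⟩ := find_facts inner pos (le_of_lt h) hb
    replace hq : ¬ (PySem.List.slice inner
        (some (PySem.Chars.findFrom inner ['\\'] (pos : Int) none + 1))
        (some (PySem.Chars.findFrom inner ['\\'] (pos : Int) none + 2)) = ['\\'] ∨
      PySem.List.slice inner
        (some (PySem.Chars.findFrom inner ['\\'] (pos : Int) none + 1))
        (some (PySem.Chars.findFrom inner ['\\'] (pos : Int) none + 2)) = ['"']) := hq
    replace hx : ¬ PySem.List.slice inner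
        (some (PySem.Chars.findFrom inner ['\\'] (pos : Int) none + 1))
        (some (PySem.Chars.findFrom inner ['\\'] (pos : Int) none + 2)) = ['x'] := hx
    rw [hcast] at hx hq
    set k := (PySem.Chars.findFrom inner ['\\'] (pos : Int) none).toNat with hkdef
    rw [show ((k : Int) + 1) = ((k + 1 : Nat) : Int) by push_cast; ring,
        show ((k : Int) + 2) = (((k + 1 : Nat) : Int) + ((1 : Nat) : Int)) by push_cast; ring,
        PySem.List.slice_natCast_add, take_one_eq_iff, take_one_eq_iff] at hq
    rw [show ((k : Int) + 1) = ((k + 1 : Nat) : Int) by push_cast; ring,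
        show ((k : Int) + 2) = (((k + 1 : Nat) : Int) + ((1 : Nat) : Int)) by push_cast; ring,
        PySem.List.slice_natCast_add, take_one_eq_iff] at hx
    have hget : inner[k]'hlt = '\\' := by
      have h5 : inner[k]? = some '\\' := by rw [← List.head?_drop]; exact hhead
      rw [List.getElem?_eq_getElem hlt] at h5
      exact Option.some.inj h5
    have hdk : inner.drop k = '\\' :: inner.drop (k + 1) := by
      rw [List.drop_eq_getElem_cons hlt, hget]
    rw [pvBLoop, dif_pos h, dif_neg hb]
    rw [if_neg (show ¬ PySem.List.slice inner _ _ = ['x'] by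
      rw [hcast,
          show ((k : Int) + 1) = ((k + 1 : Nat) : Int) by push_cast; ring,
          show ((k : Int) + 2) = (((k + 1 : Nat) : Int) + ((1 : Nat) : Int)) by push_cast; ring,
          PySem.List.slice_natCast_add, take_one_eq_iff]
      exact hx)]
    rw [if_neg (show ¬ (PySem.List.slice inner _ _ = ['\\'] ∨ PySem.List.slice inner _ _ = ['"']) by
      rw [hcast,
          show ((k : Int) + 1) = ((k + 1 : Nat) : Int) by push_cast; ring,
          show ((k : Int) + 2) = (((k + 1 : Nat) : Int) + ((1 : Nat) : Int)) by push_cast; ring,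
          PySem.List.slice_natCast_add, take_one_eq_iff, take_one_eq_iff]
      exact hq)]
    rw [← hkdef, ih, hcnt, hdk, count_step_other _ hx hq]
    omega
  | case1 pos total h b hb =>
    -- find returned -1: no backslash from pos on
    have hno : '\\' ∉ inner.drop pos := by
      have := (PySem.Chars.findFrom_natCast_eq_neg_one_iff inner ['\\'] pos (le_of_lt h)).mp hb
      exact fun hm => this ((singleton_infix_iff _ _).mpr hm)
    rw [pvBLoop, dif_pos h, dif_pos hb]
    have := count_append_no_bs (inner.drop pos) [] hno
    simp at this
    rw [this]; simp [pvCount]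
  | case5 pos total h =>
    rw [pvBLoop, dif_neg h]
    rw [List.drop_eq_nil_of_le (by omega)]
    simp [pvCount]

-- ===== VERDICT (by name: the statement is the Claim_ definition above) =====
theorem getInMemoryLength_spec : Claim_equal_getInMemoryLength := by
  intro s _
  unfold Spec_getInMemoryLength getInMemoryLength getInMemoryLength_alt
  rw [slice_one_neg_one, loop_eq_bcount, bloop_eq_count]
  simp
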